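-- pv_equiv track=rewrite | github.com/MoonKuma/pandas_regression | pandas_method/pandas_method.py | pick_columns
-- ===== SOURCE A (Python) =====
-- def pick_columns(columns, word_starts_with=None, word_ends_with=None):
--     """
--     Pick columns with comparing starts and ends
--     :param columns: list [iterable object] of full columns
--     :param word_starts_with:  to start with certain string
--     :param word_ends_with:  to end with certain string
--     :return: the selected list
--     """
--     col_picked_start = list()
--     col_picked_end = list()
--     col_picked_both = list()
--     for word in columns:
--         if word_starts_with is not None and str(word).startswith(word_starts_with):
--             col_picked_start.append(word)
--         if word_ends_with is not None and str(word).endswith(word_ends_with):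
--             col_picked_end.append(word)
--         if word_starts_with is not None and str(word).startswith(word_starts_with) and word_ends_with is not None and str(word).endswith(word_ends_with):
--             col_picked_both.append(word)
--     if word_starts_with is not None and word_ends_with is None:
--         return col_picked_start
--     if word_starts_with is None and word_ends_with is not None:
--         return col_picked_end
--     if word_starts_with is not None and word_ends_with is not None:
--         return col_picked_both
-- ===== SOURCE B (Python) =====
-- def pick_columns(columns, word_starts_with=None, word_ends_with=None):
--     if word_starts_with is not None and word_ends_with is None:
--         return [w for w in columns if str(w).startswith(word_starts_with)]
--     if word_starts_with is None and word_ends_with is not None: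
--         return [w for w in columns if str(w).endswith(word_ends_with)]
--     if word_starts_with is not None and word_ends_with is not None:
--         return [w for w in columns if str(w).startswith(word_starts_with)
--                 and str(w).endswith(word_ends_with)]
-- ===== Notes on version B (the rewrite author's own statement) =====
-- stated objective: simpler
-- what changed: Dispatch on which filters are given first, then run one targeted filter pass, instead of building three candidate lists in one loop and selecting one afterwards.
-- outside the precondition, e.g. on pick_columns(['a'], None, None): A returns None, B returns None
import Mathlib
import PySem

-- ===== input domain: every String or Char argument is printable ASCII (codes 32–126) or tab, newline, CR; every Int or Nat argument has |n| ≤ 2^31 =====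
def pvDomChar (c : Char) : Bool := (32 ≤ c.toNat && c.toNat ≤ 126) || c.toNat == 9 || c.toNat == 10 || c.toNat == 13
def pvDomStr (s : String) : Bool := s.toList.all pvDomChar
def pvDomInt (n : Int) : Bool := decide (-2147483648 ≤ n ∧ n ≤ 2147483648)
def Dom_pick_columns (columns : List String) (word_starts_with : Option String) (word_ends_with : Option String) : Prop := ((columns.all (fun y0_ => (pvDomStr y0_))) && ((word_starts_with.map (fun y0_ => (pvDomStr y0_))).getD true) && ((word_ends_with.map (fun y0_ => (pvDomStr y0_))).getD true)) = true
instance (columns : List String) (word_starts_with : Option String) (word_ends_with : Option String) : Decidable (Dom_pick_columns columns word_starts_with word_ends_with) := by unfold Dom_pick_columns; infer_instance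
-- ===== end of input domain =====

-- B dispatches on which filters are given and runs one targeted filter pass,
-- instead of A's building three candidate lists in one loop and selecting one afterwards (objective: simpler).
-- Pre_ excludes the case where both filters are None, on which A falls through and returns None (not a list).


-- ===== PORT A =====
-- `word_starts_with is not None and str(word).startswith(word_starts_with)` (word is already a str)
def pvStartTest (p : Option String) (word : String) : Bool :=
  match p with
  | none => false
  | some s => PySem.Str.startswith word s

def pvEndTest (q : Option String) (word : String) : Bool :=
  match q with
  | none => false
  | some s => PySem.Str.endswith word s

-- one pass appending into the three lists, then the if-chain selecting one;
-- the both-None fall-through (Python returns None) is excluded by Pre_ and yields [] here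
def pick_columns (columns : List String) (word_starts_with : Option String) (word_ends_with : Option String) : List String :=
  let acc := columns.foldl
    (fun (acc : List String × List String × List String) word =>
      let s := if pvStartTest word_starts_with word then acc.1 ++ [word] else acc.1
      let e := if pvEndTest word_ends_with word then acc.2.1 ++ [word] else acc.2.1
      let b := if pvStartTest word_starts_with word && pvEndTest word_ends_with word then acc.2.2 ++ [word] else acc.2.2
      (s, e, b))
    ([], [], [])
  if word_starts_with.isSome && !word_ends_with.isSome then acc.1
  else if !word_starts_with.isSome && word_ends_with.isSome then acc.2.1
  else if word_starts_with.isSome && word_ends_with.isSome then acc.2.2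
  else []

-- ===== PORT B =====
def pick_columns_alt (columns : List String) (word_starts_with : Option String) (word_ends_with : Option String) : List String :=
  match word_starts_with, word_ends_with with
  | some p, none => columns.filter (fun w => PySem.Str.startswith w p)
  | none, some q => columns.filter (fun w => PySem.Str.endswith w q)
  | some p, some q => columns.filter (fun w => PySem.Str.startswith w p && PySem.Str.endswith w q)
  | none, none => []  -- excluded by Pre_: Python A returns None here

-- ===== PRECONDITION & SPEC =====
-- Pre_ excludes only the both-None input, where Python A returns None instead of a list.
def Pre_pick_columns (columns : List String) (word_starts_with : Option String) (word_ends_with : Option String) : Prop :=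
  word_starts_with.isSome ∨ word_ends_with.isSome
instance (columns : List String) (word_starts_with : Option String) (word_ends_with : Option String) : Decidable (Pre_pick_columns columns word_starts_with word_ends_with) := by unfold Pre_pick_columns; infer_instance

def pvWitness_pick_columns : List String × Option String × Option String := (["ab", "ba", "aa"], some "a", none)

def Spec_pick_columns (columns : List String) (word_starts_with : Option String) (word_ends_with : Option String) (out : List String) : Prop := out = pick_columns_alt columns word_starts_with word_ends_with
instance (columns : List String) (word_starts_with : Option String) (word_ends_with : Option String) (out : List String) : Decidable (Spec_pick_columns columns word_starts_with word_ends_with out) := by unfold Spec_pick_columns; infer_instance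

-- ===== CLAIM (what is proved, stated in full; the proofs are below) =====
def Claim_equal_pick_columns : Prop := ∀ (columns : List String) (word_starts_with : Option String) (word_ends_with : Option String), Dom_pick_columns columns word_starts_with word_ends_with → Pre_pick_columns columns word_starts_with word_ends_with → Spec_pick_columns columns word_starts_with word_ends_with (pick_columns columns word_starts_with word_ends_with)

-- ===== LEMMAS AND PROOFS =====
-- the fold builds, onto each accumulator, exactly the filter of the corresponding test
theorem pick_columns_fold (columns : List String) (p q : Option String) (s e b : List String) :
    columns.foldl
      (fun (acc : List String × List String × List String) word =>
        let s := if pvStartTest p word then acc.1 ++ [word] else acc.1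
        let e := if pvEndTest q word then acc.2.1 ++ [word] else acc.2.1
        let b := if pvStartTest p word && pvEndTest q word then acc.2.2 ++ [word] else acc.2.2
        (s, e, b))
      (s, e, b)
    = (s ++ columns.filter (pvStartTest p),
       e ++ columns.filter (pvEndTest q),
       b ++ columns.filter (fun w => pvStartTest p w && pvEndTest q w)) := by
  induction columns generalizing s e b with
  | nil => simp
  | cons w ws ih =>
    simp only [List.foldl_cons, List.filter_cons]
    rw [ih]
    by_cases hs : pvStartTest p w <;> by_cases he : pvEndTest q w <;>
      simp [hs, he]

theorem pick_columns_spec : Claim_equal_pick_columns := by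
  intro columns ws we _ hpre
  unfold Spec_pick_columns pick_columns
  rw [pick_columns_fold]
  match ws, we with
  | some p, none =>
    simp only [pick_columns_alt, Option.isSome_some, Option.isSome_none, Bool.not_false,
      Bool.and_true, Bool.and_false, List.nil_append, if_true, Bool.not_true]
    exact List.filter_congr (fun w _ => by simp [pvStartTest])
  | none, some q =>
    simp only [pick_columns_alt, Option.isSome_some, Option.isSome_none, Bool.not_false,
      Bool.false_and, Bool.true_and, Bool.and_false, List.nil_append, if_false, Bool.not_true]
    exact List.filter_congr (fun w _ => by simp [pvEndTest])
  | some p, some q =>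
    simp only [pick_columns_alt, Option.isSome_some, Bool.not_true, Bool.and_false,
      Bool.and_true, List.nil_append, if_false]
    exact List.filter_congr (fun w _ => by simp [pvStartTest, pvEndTest])
  | none, none =>
    rcases hpre with h | h <;> simp at h
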